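-- pv_equiv track=rewrite | github.com/tcgoetz/Fit | Field.py | convert_many
-- ===== SOURCE A (Python) =====
-- def convert_many(value, invalid):
--     if isinstance(value, list):
--         converted_value = ""
--         for character in value:
--             if character != 0:
--                 converted_value += chr(character)
--             else:
--                 break
--     else:
--         converted_value = str(value)
--     return converted_value.strip()
-- ===== SOURCE B (Python) =====
-- def convert_many(value, invalid):
--     if isinstance(value, list):
--         prefix = value[:value.index(0)] if 0 in value else value
--         return ''.join(chr(c) for c in prefix).strip()
--     return str(value).strip()
-- ===== Notes on version B (the rewrite author's own statement) =====
-- stated objective: idiomatic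
-- what changed: B first locates the zero terminator (value.index(0) guarded by a membership test) and slices the prefix, then maps the codes to characters with a single ''.join, instead of A's char-by-char string accumulation with break inside the loop.
-- outside the precondition, e.g. on convert_many([200000000, 0], 0): A raises ValueError, B raises ValueError
import Mathlib
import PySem

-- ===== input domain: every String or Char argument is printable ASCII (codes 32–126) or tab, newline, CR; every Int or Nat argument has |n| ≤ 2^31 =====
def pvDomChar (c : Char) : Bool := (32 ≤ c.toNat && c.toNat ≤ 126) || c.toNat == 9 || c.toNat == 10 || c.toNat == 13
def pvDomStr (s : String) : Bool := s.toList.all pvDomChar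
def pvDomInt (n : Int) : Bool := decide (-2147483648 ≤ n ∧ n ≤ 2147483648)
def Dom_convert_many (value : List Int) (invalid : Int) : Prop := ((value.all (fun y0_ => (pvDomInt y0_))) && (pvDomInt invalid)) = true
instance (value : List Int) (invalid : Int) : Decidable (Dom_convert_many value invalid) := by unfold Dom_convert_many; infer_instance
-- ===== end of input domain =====

-- B builds the result in one step (locate the zero terminator, then map codes to chars and join)
-- instead of A's char-by-char string accumulation with break; objective: idiomatic, no speed claim.

-- ===== PORT A =====
-- for character in value: if character != 0: converted_value += chr(character) else: break
def convert_many_loop (acc : List Char) : List Int → List Char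
  | [] => acc
  | c :: rest =>
      if c ≠ 0 then convert_many_loop (acc ++ [Char.ofNat c.toNat]) rest
      else acc

def convert_many (value : List Int) (invalid : Int) : String :=
  String.mk (PySem.Chars.strip (convert_many_loop [] value))

-- ===== PORT B =====
-- prefix = value[:value.index(0)] if 0 in value else value; ''.join(chr(c) for c in prefix).strip()
def convert_many_alt (value : List Int) (invalid : Int) : String :=
  let pfx : List Int :=
    match PySem.List.index? value (0 : Int) with
    | some i => PySem.List.slice value none (some (i : Int))
    | none   => value
  String.mk (PySem.Chars.strip (pfx.map (fun c => Char.ofNat c.toNat)))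

-- ===== PRECONDITION & SPEC =====
-- Pre_ excludes lists whose pre-zero prefix contains a code outside chr's range [0, 0x10FFFF]
-- (there the Python A raises ValueError) or a surrogate code 0xD800–0xDFFF (there A returns a
-- lone-surrogate string that is not representable as a Lean Char/String).
def Pre_convert_many (value : List Int) (invalid : Int) : Prop :=
  ∀ c ∈ value.takeWhile (fun x => x ≠ 0),
    (0 ≤ c ∧ c < 55296) ∨ (57343 < c ∧ c ≤ 1114111)
instance (value : List Int) (invalid : Int) : Decidable (Pre_convert_many value invalid) := by
  unfold Pre_convert_many; infer_instance

def pvWitness_convert_many : List Int × Int := ([32, 72, 105, 33, 9, 0, 55296], 0)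

def Spec_convert_many (value : List Int) (invalid : Int) (out : String) : Prop := out = convert_many_alt value invalid
instance (value : List Int) (invalid : Int) (out : String) : Decidable (Spec_convert_many value invalid out) := by unfold Spec_convert_many; infer_instance

-- ===== CLAIM (what is proved, stated in full; the proofs are below) =====
def Claim_equal_convert_many : Prop := ∀ (value : List Int) (invalid : Int), Dom_convert_many value invalid → Pre_convert_many value invalid → Spec_convert_many value invalid (convert_many value invalid)

-- ===== LEMMAS AND PROOFS =====

-- A's loop appends, char by char, exactly the chr-image of the longest zero-free prefix.
theorem convert_many_loop_eq (v : List Int) (acc : List Char) :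
    convert_many_loop acc v =
      acc ++ (v.takeWhile (fun x => x ≠ 0)).map (fun c => Char.ofNat c.toNat) := by
  induction v generalizing acc with
  | nil => simp [convert_many_loop]
  | cons c rest ih =>
      by_cases hc : c = 0
      · simp [convert_many_loop, hc, List.takeWhile]
      · simp [convert_many_loop, hc, List.takeWhile, ih]

-- B's cut (slice at the first index of 0, or the whole list) is the longest zero-free prefix.
theorem cut_eq_takeWhile (v : List Int) :
    (match PySem.List.index? v (0 : Int) with
      | some i => PySem.List.slice v none (some (i : Int))
      | none   => v) = v.takeWhile (fun x => x ≠ 0) := by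
  induction v with
  | nil => simp [PySem.List.index?]
  | cons c rest ih =>
      by_cases hc : c = 0
      · subst hc
        rw [PySem.List.index?_cons_self]
        show PySem.List.slice (0 :: rest) none (some ((0 : Nat) : Int)) = _
        rw [PySem.List.slice_to_natCast]
        simp [List.takeWhile]
      · rw [PySem.List.index?_cons_of_ne rest hc]
        cases hidx : PySem.List.index? rest (0 : Int) with
        | none =>
            simp only [hidx] at ih
            simp only [Option.map_none]
            have h2 : List.takeWhile (fun x => x ≠ 0) (c :: rest)
                = c :: List.takeWhile (fun x => x ≠ 0) rest := by
              simp [List.takeWhile, hc]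
            rw [h2, ← ih]
        | some i =>
            simp only [hidx] at ih
            rw [PySem.List.slice_to_natCast] at ih
            simp only [Option.map_some]
            show PySem.List.slice (c :: rest) none (some (((i + 1 : Nat)) : Int)) = _
            rw [PySem.List.slice_to_natCast]
            simp [List.takeWhile, hc, List.take_succ_cons, ih]

-- ===== VERDICT (by name: the statement is the Claim_ definition above) =====
theorem convert_many_spec : Claim_equal_convert_many := by
  intro value invalid _ _
  unfold Spec_convert_many convert_many convert_many_alt
  rw [convert_many_loop_eq, cut_eq_takeWhile]
  simp
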